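-- pv_equiv track=rewrite | github.com/jaeyun95/Programmers | level1/level1_ex38.py | solution
-- ===== SOURCE A (Python) =====
-- def solution(s):
--     if len(s) == 1 : return len(s)
--     for size in range(1,len(s)//2 + 1):
--         count = 0
--         pre_string= ""
--         for i in range(0,len(s) + 1,size):
--             if pre_string[-size:] == s[i:i+size]: count += 1
--             else:
--                 if count > 1: pre_string += str(count) + s[i:i+size]
--                 else: pre_string += s[i:i+size]
--                 count = 1
--         if size == 1: min_size = len(pre_string)
--         else :
--             if min_size > len(pre_string):
--                 min_size = len(pre_string)
--     return min_size
-- ===== SOURCE B (Python) =====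
-- def solution(s):
--     n = len(s)
--     if n == 1:
--         return 1
--     totals = [_compressed_total(s, n, size) for size in range(1, n // 2 + 1)]
--     return min(totals)
--
--
-- def _compressed_total(s, n, size):
--     # Prefix counts of self-mismatch positions at offset `size`: pref[i] is the
--     # number of p in [size, i) with s[p] != s[p - size].  Two consecutive full
--     # chunks are then equal iff the count does not grow across the boundary,
--     # an O(1) test with no slicing; the length is tracked by a savings formula
--     # instead of building the compressed string.
--     pref = [0]
--     for p in range(n):
--         pref.append(pref[-1] + (1 if p >= size and s[p] != s[p - size] else 0))
--     m = -(-n // size)  # number of chunks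
--     total = n          # uncompressed length, adjusted per repeated run
--     run = 1
--     for j in range(1, m):
--         if (j + 1) * size <= n and pref[(j + 1) * size] == pref[j * size]:
--             run += 1
--         else:
--             if run > 1:
--                 total += len(str(run)) - (run - 1) * size
--             run = 1
--     if run > 1:
--         total += len(str(run)) - (run - 1) * size
--     return total
-- ===== Notes on version B (the rewrite author's own statement) =====
-- stated objective: alternative
-- what changed: Instead of simulating the compression by building the compressed string per chunk size and comparing slices, B precomputes per size a prefix array counting self-mismatches at offset size, tests consecutive-chunk equality in O(1) via two prefix-count lookups, and tracks only the length through a closed-form savings adjustment per repeated run.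
import Mathlib
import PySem

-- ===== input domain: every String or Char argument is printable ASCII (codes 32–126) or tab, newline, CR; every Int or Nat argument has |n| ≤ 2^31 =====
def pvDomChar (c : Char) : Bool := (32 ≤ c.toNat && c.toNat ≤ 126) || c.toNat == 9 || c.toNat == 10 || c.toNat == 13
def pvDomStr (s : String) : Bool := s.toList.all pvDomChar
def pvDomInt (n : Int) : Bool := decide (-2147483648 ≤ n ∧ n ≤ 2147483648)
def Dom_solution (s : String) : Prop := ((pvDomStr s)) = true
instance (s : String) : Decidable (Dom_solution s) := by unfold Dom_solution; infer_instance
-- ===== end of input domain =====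

-- B replaces A's per-size string building by a per-size mismatch-count prefix array
-- (O(1) equality test for consecutive chunks) and a closed-form length adjustment; objective: alternative.

-- ===== PORT A =====
def solution (s : String) : Int :=
  let l := s.toList
  let n : Int := PySem.Chars.len l
  if n = 1 then n
  else
    (PySem.List.pyRange 1 (PySem.Int.floordiv n 2 + 1) 1).foldl
      (fun minSize size =>
        let st := (PySem.List.pyRange 0 (n + 1) size).foldl
          (fun (st : Int × List Char) i =>
            if PySem.List.slice st.2 (some (-size)) none =
                PySem.List.slice l (some i) (some (i + size)) then
              (st.1 + 1, st.2)
            else if st.1 > 1 then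
              (1, st.2 ++ PySem.Int.toChars st.1 ++ PySem.List.slice l (some i) (some (i + size)))
            else
              (1, st.2 ++ PySem.List.slice l (some i) (some (i + size))))
          (0, [])
        if size = 1 then PySem.Chars.len st.2
        else if minSize > PySem.Chars.len st.2 then PySem.Chars.len st.2 else minSize)
      0

-- ===== PORT B =====
-- helper `_compressed_total` of Source B; s[p] / pref[idx] are in range wherever read (1 ≤ size, 0 ≤ p < n), so pyGetD is exact
def compressedTotal (l : List Char) (n size : Int) : Int :=
  let pref := (PySem.List.pyRange 0 n 1).foldl
    (fun (pref : List Int) p =>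
      pref ++ [PySem.List.pyGetD pref (-1) 0 +
        (if p ≥ size ∧ PySem.List.pyGetD l p ' ' ≠ PySem.List.pyGetD l (p - size) ' ' then 1 else 0)])
    [0]
  let m := -(PySem.Int.floordiv (-n) size)
  let st := (PySem.List.pyRange 1 m 1).foldl
    (fun (st : Int × Int) j =>
      if (j + 1) * size ≤ n ∧
          PySem.List.pyGetD pref ((j + 1) * size) 0 = PySem.List.pyGetD pref (j * size) 0 then
        (st.1, st.2 + 1)
      else if st.2 > 1 then
        (st.1 + PySem.Chars.len (PySem.Int.toChars st.2) - (st.2 - 1) * size, 1)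
      else (st.1, 1))
    (n, 1)
  if st.2 > 1 then st.1 + PySem.Chars.len (PySem.Int.toChars st.2) - (st.2 - 1) * size else st.1

def solution_alt (s : String) : Int :=
  let l := s.toList
  let n : Int := PySem.Chars.len l
  if n = 1 then 1
  else
    let totals := (PySem.List.pyRange 1 (PySem.Int.floordiv n 2 + 1) 1).map
      (fun size => compressedTotal l n size)
    (PySem.List.min? totals (fun x => x)).getD 0

-- ===== PRECONDITION & SPEC =====
-- Pre_ excludes only the empty string, on which A raises UnboundLocalError (min_size is never assigned).
def Pre_solution (s : String) : Prop := s ≠ ""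
instance (s : String) : Decidable (Pre_solution s) := by unfold Pre_solution; infer_instance
def pvWitness_solution : String := "aabbaccc"

def Spec_solution (s : String) (out : Int) : Prop := out = solution_alt s
instance (s : String) (out : Int) : Decidable (Spec_solution s out) := by unfold Spec_solution; infer_instance

-- ===== CLAIM (what is proved, stated in full; the proofs are below) =====
def Claim_equal_solution : Prop := ∀ (s : String), Dom_solution s → Pre_solution s → Spec_solution s (solution s)

-- ===== LEMMAS AND PROOFS =====

-- chunk k of length d
def chunkL (l : List Char) (d k : Nat) : List Char := (l.drop (k*d)).take d

def padLen (c : Int) : Int := if c > 1 then PySem.Chars.len (PySem.Int.toChars c) else 0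

def adjLen (d : Nat) (c : Int) : Int :=
  if c > 1 then PySem.Chars.len (PySem.Int.toChars c) - (c-1)*(d:Int) else 0

def aAbs : List (Bool × Int) → Int × Int → Int × Int
  | [], st => st
  | p :: rest, st => aAbs rest (if p.1 then (st.1 + 1, st.2) else (1, st.2 + padLen st.1 + p.2))

def bAbs (d : Nat) : List Bool → Int × Int → Int × Int
  | [], st => st
  | b :: rest, st => bAbs d rest (if b then (st.1, st.2 + 1) else (st.1 + adjLen d st.2, 1))

lemma pad_sub_adj (d : Nat) (c : Int) (hc : 1 ≤ c) : padLen c - adjLen d c = (c-1)*(d:Int) := by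
  unfold padLen adjLen
  split_ifs with h
  · ring
  · have : c = 1 := by omega
    simp [this]

lemma scan_rel (d : Nat) : ∀ (bs : List (Bool × Int)) (c L T : Int), 1 ≤ c →
    (∀ p ∈ bs, p.1 = true → p.2 = (d:Int)) →
    L = T - (bs.map (·.2)).sum - (c-1)*(d:Int) →
    ((aAbs bs (c,L)).2 + padLen (aAbs bs (c,L)).1
      = (bAbs d (bs.map (·.1)) (T,c)).1 + adjLen d (bAbs d (bs.map (·.1)) (T,c)).2)
    ∧ 1 ≤ (aAbs bs (c,L)).1 := by
  intro bs
  induction bs with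
  | nil =>
    intro c L T hc _ hL
    simp only [aAbs, bAbs, List.map_nil, List.sum_nil] at *
    constructor
    · have := pad_sub_adj d c hc
      omega
    · exact hc
  | cons p rest ih =>
    intro c L T hc htrue hL
    simp only [List.map_cons, List.sum_cons] at hL
    by_cases hb : p.1 = true
    · have hlen : p.2 = (d:Int) := htrue p (by simp) hb
      simp only [aAbs, bAbs, List.map_cons, hb, if_true]
      exact ih (c+1) L T (by omega) (fun q hq => htrue q (by simp [hq]))
        (by rw [hL, hlen]; ring)
    · simp only [Bool.not_eq_true] at hb
      simp only [aAbs, bAbs, List.map_cons, hb, Bool.false_eq_true, if_false]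
      refine ih 1 (L + padLen c + p.2) (T + adjLen d c) (by omega)
        (fun q hq => htrue q (by simp [hq])) ?_
      rw [hL]
      linear_combination pad_sub_adj d c hc

lemma aAbs_append (bs bs' : List (Bool × Int)) (st : Int × Int) :
    aAbs (bs ++ bs') st = aAbs bs' (aAbs bs st) := by
  induction bs generalizing st with
  | nil => simp [aAbs]
  | cons p rest ih => simp [aAbs, ih]

def stepN (l : List Char) (d : Nat) (st : Int × List Char) (k : Nat) : Int × List Char :=
  if st.2.drop (st.2.length - d) = chunkL l d k then (st.1 + 1, st.2)
  else if st.1 > 1 then (1, st.2 ++ PySem.Int.toChars st.1 ++ chunkL l d k)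
  else (1, st.2 ++ chunkL l d k)

def pairA (l : List Char) (d k : Nat) : Bool × Int :=
  (decide (chunkL l d (k-1) = chunkL l d k), ((chunkL l d k).length : Int))

lemma drop_tail_append (xs ys : List Char) (d : Nat) (hy : ys.length = d) :
    (xs ++ ys).drop ((xs ++ ys).length - d) = ys := by
  have : (xs ++ ys).length - d = xs.length := by simp [List.length_append, hy]
  rw [this, List.drop_left]

lemma aSim (l : List Char) (d : Nat) (hd : 0 < d) :
    ∀ (t k0 : Nat), 1 ≤ k0 →
    (∀ j, j + 1 < t → (k0 + j + 1) * d ≤ l.length) →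
    ∀ (c : Int) (pre : List Char), 1 ≤ c →
    pre.drop (pre.length - d) = chunkL l d (k0 - 1) →
    ((List.range' k0 t).foldl (stepN l d) (c, pre)).1
        = (aAbs ((List.range' k0 t).map (pairA l d)) (c, (pre.length:Int))).1
    ∧ (((List.range' k0 t).foldl (stepN l d) (c, pre)).2.length : Int)
        = (aAbs ((List.range' k0 t).map (pairA l d)) (c, (pre.length:Int))).2 := by
  intro t
  induction t with
  | zero => intro k0 _ _ c pre _ _; simp [aAbs]
  | succ t ih =>
    intro k0 hk0 hfull c pre hc htail
    rw [List.range'_succ]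
    simp only [List.map_cons, List.foldl_cons]
    by_cases heq : pre.drop (pre.length - d) = chunkL l d k0
    · -- equal: count += 1
      have hchunk : chunkL l d (k0-1) = chunkL l d k0 := htail ▸ heq
      have hstep : stepN l d (c, pre) k0 = (c + 1, pre) := by simp [stepN, heq]
      rw [hstep]
      have habs : pairA l d k0 = (true, ((chunkL l d k0).length : Int)) := by
        simp [pairA, hchunk]
      rw [habs]
      simp only [aAbs, if_true]
      exact ih (k0+1) (by omega)
        (fun j hj => by
          simpa [show k0+1+j+1 = k0+(j+1)+1 by omega] using hfull (j+1) (by omega))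
        (c+1) pre (by omega) (by simpa [Nat.add_sub_cancel] using heq)
    · -- not equal: flush
      have hchunk : ¬ (chunkL l d (k0-1) = chunkL l d k0) := fun h => heq (htail ▸ h)
      have habs : pairA l d k0 = (false, ((chunkL l d k0).length : Int)) := by
        simp [pairA, hchunk]
      rw [habs]
      simp only [aAbs, Bool.false_eq_true, if_false]
      rcases Nat.eq_zero_or_pos t with ht0 | htpos
      · subst ht0
        simp only [List.range'_zero, List.foldl_nil, List.map_nil, aAbs]
        by_cases hcg : c > 1
        · simp [stepN, heq, hcg, padLen, PySem.Chars.len_eq]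
          ring
        · have hc1 : c = 1 := by omega
          subst hc1
          simp [stepN, heq, padLen]
      · -- t > 0 : next chunk's predecessor (k0) is full
        have hfull0 : (k0 + 1) * d ≤ l.length := by
          have := hfull 0 (by omega); simpa using this
        have hkd : k0 * d + d ≤ l.length := by
          rw [← Nat.succ_mul]; exact hfull0
        have hclen : (chunkL l d k0).length = d := by
          simp only [chunkL, List.length_take, List.length_drop]
          omega
        by_cases hcg : c > 1
        · have hstep : stepN l d (c, pre) k0
              = (1, pre ++ PySem.Int.toChars c ++ chunkL l d k0) := by
            simp [stepN, heq, hcg]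
          rw [hstep]
          have htail' : (pre ++ PySem.Int.toChars c ++ chunkL l d k0).drop
              ((pre ++ PySem.Int.toChars c ++ chunkL l d k0).length - d) = chunkL l d k0 := by
            rw [List.append_assoc, ← List.append_assoc]
            exact drop_tail_append _ _ d hclen
          have := ih (k0+1) (by omega)
            (fun j hj => by
              simpa [show k0+1+j+1 = k0+(j+1)+1 by omega] using hfull (j+1) (by omega))
            1 (pre ++ PySem.Int.toChars c ++ chunkL l d k0) le_rfl
            (by simpa [Nat.add_sub_cancel] using htail')
          have hL : ((pre ++ PySem.Int.toChars c ++ chunkL l d k0).length : Int)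
              = (pre.length : Int) + padLen c + ((chunkL l d k0).length : Int) := by
            simp [List.length_append, padLen, hcg, PySem.Chars.len_eq]
            ring
          rw [← hL]
          exact this
        · have hc1 : c = 1 := by omega
          have hstep : stepN l d (c, pre) k0 = (1, pre ++ chunkL l d k0) := by
            simp [stepN, heq, hcg]
          rw [hstep]
          have htail' : (pre ++ chunkL l d k0).drop
              ((pre ++ chunkL l d k0).length - d) = chunkL l d k0 :=
            drop_tail_append _ _ d hclen
          have := ih (k0+1) (by omega)
            (fun j hj => by
              simpa [show k0+1+j+1 = k0+(j+1)+1 by omega] using hfull (j+1) (by omega))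
            1 (pre ++ chunkL l d k0) le_rfl
            (by simpa [Nat.add_sub_cancel] using htail')
          have hL : ((pre ++ chunkL l d k0).length : Int)
              = (pre.length : Int) + padLen c + ((chunkL l d k0).length : Int) := by
            simp [List.length_append, padLen, hc1]
          rw [← hL]
          exact this


def misB (l : List Char) (d p : Nat) : Bool :=
  decide (d ≤ p) && decide (l.getD p ' ' ≠ l.getD (p - d) ' ')

def mCount (l : List Char) (d i : Nat) : Nat := (List.range i).countP (misB l d)

def prefStep (l : List Char) (d : Int) (pref : List Int) (p : Int) : List Int :=
  pref ++ [PySem.List.pyGetD pref (-1) 0 +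
    (if p ≥ d ∧ PySem.List.pyGetD l p ' ' ≠ PySem.List.pyGetD l (p - d) ' ' then 1 else 0)]

lemma prefFold (l : List Char) (d : Nat) : ∀ (mm : Nat),
    (List.range mm).foldl (fun pref p => prefStep l (d:Int) pref (p:Nat)) [0]
      = (List.range (mm+1)).map (fun i => (mCount l d i : Int)) := by
  intro mm
  induction mm with
  | zero => simp [mCount, List.range_succ]
  | succ mm ih =>
    rw [List.range_succ, List.foldl_append, ih]
    simp only [List.foldl_cons, List.foldl_nil]
    have hmap : (List.range (mm+1)).map (fun i => (mCount l d i : Int))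
        = (List.range mm).map (fun i => (mCount l d i : Int)) ++ [(mCount l d mm : Int)] := by
      rw [List.range_succ, List.map_append]; rfl
    have hcond : ((mm:Int) ≥ (d:Int) ∧
          PySem.List.pyGetD l (mm:Int) ' ' ≠ PySem.List.pyGetD l ((mm:Int) - (d:Int)) ' ')
        ↔ misB l d mm = true := by
      unfold misB
      by_cases hdm : d ≤ mm
      · have hcast : ((mm:Int) - (d:Int)) = ((mm - d : Nat) : Int) := by omega
        rw [hcast, PySem.List.pyGetD_natCast, PySem.List.pyGetD_natCast]
        simp only [Bool.and_eq_true, decide_eq_true_eq, ge_iff_le]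
        exact ⟨fun h => ⟨hdm, h.2⟩, fun h => ⟨by exact_mod_cast hdm, h.2⟩⟩
      · have hdm' : ¬ ((mm:Int) ≥ (d:Int)) := by exact_mod_cast hdm
        constructor
        · rintro ⟨h1, _⟩; exact absurd h1 hdm'
        · intro h
          rw [Bool.and_eq_true] at h
          exact absurd (of_decide_eq_true h.1) hdm
    have hcnt : mCount l d (mm+1) = mCount l d mm + (if misB l d mm = true then 1 else 0) := by
      unfold mCount
      rw [List.range_succ, List.countP_append]
      simp [List.countP_cons]
    have hget : PySem.List.pyGetD ((List.range (mm+1)).map (fun i => (mCount l d i : Int))) (-1) 0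
        = (mCount l d mm : Int) := by
      rw [hmap, PySem.List.pyGetD_neg_one_append_singleton]
    rw [prefStep, hget, List.range_succ (n := mm+1), List.map_append]
    congr 1
    have hval : (mCount l d (mm+1) : Int) = (mCount l d mm : Int) +
        (if ((mm:Int) ≥ (d:Int) ∧
            PySem.List.pyGetD l (mm:Int) ' ' ≠ PySem.List.pyGetD l ((mm:Int) - (d:Int)) ' ')
          then 1 else 0) := by
      rw [hcnt]
      by_cases hm : misB l d mm = true
      · rw [if_pos hm, if_pos (hcond.mpr hm)]; push_cast; ring
      · rw [if_neg hm, if_neg (fun hh => hm (hcond.mp hh))]; push_cast; ring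
    rw [List.map_cons, List.map_nil, hval]

lemma prefGet (l : List Char) (d nn i : Nat) (hi : i ≤ nn) :
    PySem.List.pyGetD ((List.range (nn+1)).map (fun i => (mCount l d i : Int))) (i : Int) 0
      = (mCount l d i : Int) := by
  rw [PySem.List.pyGetD_natCast]
  rw [List.getD_eq_getElem?_getD, List.getElem?_map, List.getElem?_range (by omega)]
  rfl

lemma mCount_interval (l : List Char) (d j : Nat) (hj : 1 ≤ j) :
    (mCount l d ((j+1)*d) = mCount l d (j*d))
      ↔ ∀ t, t < d → l.getD (j*d + t) ' ' = l.getD (j*d + t - d) ' ' := by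
  have hsplit : (j+1)*d = j*d + d := by ring
  have : mCount l d ((j+1)*d) = mCount l d (j*d) + (List.range d).countP (fun t => misB l d (j*d + t)) := by
    unfold mCount
    rw [hsplit, List.range_add, List.countP_append, List.countP_map]
    rfl
  rw [this]
  constructor
  · intro h t ht
    have hz : (List.range d).countP (fun t => misB l d (j*d + t)) = 0 := by omega
    have hmem := List.countP_eq_zero.mp hz t (List.mem_range.mpr ht)
    simp only [misB, Bool.and_eq_true, decide_eq_true_eq, not_and] at hmem
    have hd : d ≤ j*d + t := le_add_right (Nat.le_mul_of_pos_left d hj)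
    exact not_ne_iff.mp (hmem hd)
  · intro h
    have hz : (List.range d).countP (fun t => misB l d (j*d + t)) = 0 := by
      rw [List.countP_eq_zero]
      intro t ht
      simp only [List.mem_range] at ht
      simp only [misB, Bool.and_eq_true, decide_eq_true_eq, not_and]
      intro _
      exact not_ne_iff.mpr (h t ht)
    omega

lemma chunk_len (l : List Char) (d k : Nat) :
    (chunkL l d k).length = min d (l.length - k*d) := by
  simp [chunkL]

lemma chunk_getElem (l : List Char) (d k t : Nat) (h : t < (chunkL l d k).length) :
    (chunkL l d k)[t] = l[k*d + t]'(by
      have := chunk_len l d k; simp [chunk_len] at h; omega) := by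
  simp only [chunkL] at *
  rw [List.getElem_take, List.getElem_drop]

lemma chunkEqIff (l : List Char) (d j : Nat) (hd : 0 < d) (hj : 1 ≤ j)
    (hjn : j*d ≤ l.length) :
    (chunkL l d (j-1) = chunkL l d j)
      ↔ ((j+1)*d ≤ l.length ∧ mCount l d ((j+1)*d) = mCount l d (j*d)) := by
  have hj1 : (j-1)*d + d = j*d := by
    have : (j-1) + 1 = j := Nat.succ_pred_eq_of_pos hj
    calc (j-1)*d + d = ((j-1)+1)*d := by rw [Nat.succ_mul]
    _ = j*d := by rw [this]
  have hj2 : (j+1)*d = j*d + d := by rw [Nat.succ_mul]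
  have hlen1 : (chunkL l d (j-1)).length = d := by rw [chunk_len]; omega
  by_cases h : (j+1)*d ≤ l.length
  · have hlen2 : (chunkL l d j).length = d := by rw [chunk_len]; omega
    rw [mCount_interval l d j hj]
    constructor
    · intro hEq
      refine ⟨h, ?_⟩
      intro t ht
      have hb1 : j*d + t < l.length := by omega
      have hb2 : (j-1)*d + t < l.length := by omega
      have hidx : j*d + t - d = (j-1)*d + t := by omega
      rw [List.getD_eq_getElem l ' ' hb1, hidx, List.getD_eq_getElem l ' ' hb2]
      have e1 := chunk_getElem l d j t (by omega)
      have e2 := chunk_getElem l d (j-1) t (by omega)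
      rw [← e1, ← e2]
      exact (List.getElem_of_eq hEq _).symm
    · rintro ⟨-, hall⟩
      apply List.ext_getElem (by omega)
      intro t h1 h2
      have ht : t < d := by omega
      have hb1 : j*d + t < l.length := by omega
      have hb2 : (j-1)*d + t < l.length := by omega
      have := hall t ht
      rw [List.getD_eq_getElem l ' ' hb1, show j*d + t - d = (j-1)*d + t by omega,
        List.getD_eq_getElem l ' ' hb2] at this
      rw [chunk_getElem l d (j-1) t h1, chunk_getElem l d j t h2]
      exact this.symm
  · constructor
    · intro hEq
      exfalso
      have := congrArg List.length hEq
      rw [hlen1, chunk_len] at this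
      omega
    · rintro ⟨h1, -⟩
      exact absurd h1 h

lemma sum_min_range (d : Nat) : ∀ (m n : Nat),
    ((List.range m).map (fun k => min d (n - k*d))).sum = min n (m*d) := by
  intro m
  induction m with
  | zero => simp
  | succ m ih =>
    intro n
    rw [List.range_succ, List.map_append, List.sum_append, ih]
    simp only [List.map_cons, List.map_nil, List.sum_cons, List.sum_nil]
    have h1 : (m+1)*d = m*d + d := by rw [Nat.succ_mul]
    omega

def innerLenA (l : List Char) (size : Int) : Int :=
  PySem.Chars.len ((PySem.List.pyRange 0 (PySem.Chars.len l + 1) size).foldl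
    (fun (st : Int × List Char) i =>
      if PySem.List.slice st.2 (some (-size)) none
          = PySem.List.slice l (some i) (some (i + size)) then (st.1 + 1, st.2)
      else if st.1 > 1 then
        (1, st.2 ++ PySem.Int.toChars st.1 ++ PySem.List.slice l (some i) (some (i + size)))
      else
        (1, st.2 ++ PySem.List.slice l (some i) (some (i + size))))
    (0, [])).2

lemma stepEq (l : List Char) (dN : Nat) (hd : 0 < dN) (st : Int × List Char) (k : Nat) :
    (if PySem.List.slice st.2 (some (-(dN:Int))) none
        = PySem.List.slice l (some ((0:Int) + ↑dN*↑k)) (some ((0:Int) + ↑dN*↑k + ↑dN)) then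
      (st.1 + 1, st.2)
    else if st.1 > 1 then
      (1, st.2 ++ PySem.Int.toChars st.1
        ++ PySem.List.slice l (some ((0:Int) + ↑dN*↑k)) (some ((0:Int) + ↑dN*↑k + ↑dN)))
    else
      (1, st.2 ++ PySem.List.slice l (some ((0:Int) + ↑dN*↑k)) (some ((0:Int) + ↑dN*↑k + ↑dN))))
    = stepN l dN st k := by
  have h1 : (0:Int) + ↑dN*↑k = ((k*dN : Nat) : Int) := by push_cast; ring
  have h2 : PySem.List.slice l (some ((0:Int) + ↑dN*↑k)) (some ((0:Int) + ↑dN*↑k + ↑dN))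
      = chunkL l dN k := by
    rw [h1]
    exact PySem.List.slice_natCast_add l (k*dN) dN
  have h3 : PySem.List.slice st.2 (some (-(dN:Int))) none = st.2.drop (st.2.length - dN) :=
    PySem.List.slice_from_neg_natCast st.2 dN hd
  rw [h2, h3, stepN]

lemma innerA_eq (l : List Char) (dN : Nat) (hd : 1 ≤ dN) (hdn : 2*dN ≤ l.length) :
    innerLenA l ↑dN
      = (aAbs ((List.range' 1 (l.length / dN)).map (pairA l dN)) (1, (dN:Int))).2 := by
  have hd0 : (0:Int) < ↑dN := by exact_mod_cast hd
  have hdn' : dN ≤ l.length := by omega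
  rw [innerLenA]
  simp only [PySem.Chars.len_eq]
  rw [PySem.List.pyRange_of_pos 0 ((l.length:Int) + 1) hd0]
  have hT : (if (0:Int) < ↑l.length + 1 then (((l.length:Int) + 1 - 0 + ↑dN - 1) / ↑dN).toNat else 0)
      = l.length / dN + 1 := by
    rw [if_pos (by positivity)]
    have : ((l.length:Int) + 1 - 0 + ↑dN - 1) = ((l.length + dN : Nat) : Int) := by push_cast; ring
    rw [this, ← Int.natCast_div, Int.toNat_natCast, Nat.add_div_right _ hd]
  rw [hT, List.foldl_map]
  rw [PySem.List.foldl_congr_mem _ _ (fun st (k : Nat) => stepN l dN st k) _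
    (fun acc x _ => stepEq l dN hd acc x)]
  rw [List.range_eq_range', List.range'_succ, List.foldl_cons]
  have hstep0 : stepN l dN (0, ([] : List Char)) 0 = (1, chunkL l dN 0) := by
    have hne : chunkL l dN 0 ≠ [] := by
      have := chunk_len l dN 0
      intro h
      rw [h] at this
      simp at this
      omega
    simp [stepN, Ne.symm hne]
  rw [hstep0]
  have hfull : ∀ j, j + 1 < l.length / dN → (1 + j + 1) * dN ≤ l.length := by
    intro j hj
    calc (1 + j + 1) * dN ≤ (l.length / dN) * dN := by
          exact Nat.mul_le_mul_right _ (by omega)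
    _ ≤ l.length := Nat.div_mul_le_self _ _
  have hlen0 : (chunkL l dN 0).length = dN := by
    rw [chunk_len]; omega
  have htail : (chunkL l dN 0).drop ((chunkL l dN 0).length - dN) = chunkL l dN (1 - 1) := by
    rw [hlen0]; simp
  have := aSim l dN (by omega) (l.length / dN) 1 le_rfl hfull 1 (chunkL l dN 0) le_rfl htail
  rw [this.2, hlen0]

def bStep (d : Nat) (st : Int × Int) (b : Bool) : Int × Int :=
  if b then (st.1, st.2 + 1) else (st.1 + adjLen d st.2, 1)

lemma bAbs_eq_foldl (d : Nat) (es : List Bool) (st : Int × Int) :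
    bAbs d es st = es.foldl (bStep d) st := by
  induction es generalizing st with
  | nil => rfl
  | cons b rest ih => simp [bAbs, bStep, List.foldl_cons, ih]

lemma postFlush (dN : Nat) (st : Int × Int) :
    (if st.2 > 1 then st.1 + PySem.Chars.len (PySem.Int.toChars st.2) - (st.2 - 1) * (dN:Int)
     else st.1) = st.1 + adjLen dN st.2 := by
  unfold adjLen
  split_ifs with h
  · ring
  · ring

-- the compressedTotal port, reduced to the abstract run scan
lemma compressedTotal_eq (l : List Char) (dN mN : Nat) (hd : 1 ≤ dN)
    (hlb : (mN - 1) * dN < l.length) (hm2 : 2 ≤ mN)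
    (hmI : -(PySem.Int.floordiv (-(l.length:Int)) ↑dN) = (mN:Int)) :
    compressedTotal l ↑l.length ↑dN
      = (bAbs dN (((List.range' 1 (mN-1)).map (pairA l dN)).map (·.1)) ((l.length:Int), 1)).1
        + adjLen dN
          (bAbs dN (((List.range' 1 (mN-1)).map (pairA l dN)).map (·.1)) ((l.length:Int), 1)).2 := by
  have hd0 : (0:Int) < ↑dN := by exact_mod_cast hd
  have hpref : ((PySem.List.pyRange 0 ((l.length:Int)) 1).foldl
      (fun (pref : List Int) p => pref ++ [PySem.List.pyGetD pref (-1) 0 +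
        (if p ≥ (dN:Int) ∧ PySem.List.pyGetD l p ' ' ≠ PySem.List.pyGetD l (p - ↑dN) ' '
          then 1 else 0)]) [0])
      = (List.range (l.length+1)).map (fun i => (mCount l dN i : Int)) := by
    rw [PySem.List.pyRange_zero_nat, List.foldl_map]
    exact prefFold l dN l.length
  rw [compressedTotal]
  simp only [hpref, hmI]
  have hrange : PySem.List.pyRange 1 (mN:Int) 1
      = (List.range (mN-1)).map (fun (k : Nat) => (1:Int) + (k:Int)) := by
    rw [PySem.List.pyRange_one]
    have ht : ((mN:Int) - 1).toNat = mN - 1 := by omega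
    rw [ht]
  rw [hrange, List.foldl_map]
  rw [PySem.List.foldl_congr_mem _ _
    (fun (st : Int × Int) (k : Nat) => bStep dN st ((pairA l dN (k+1)).1)) _ ?_]
  · rw [← List.foldl_map (f := fun k => (pairA l dN (k+1)).1) (g := bStep dN), ← bAbs_eq_foldl]
    have hmaps : (List.range (mN-1)).map (fun k => (pairA l dN (k+1)).1)
        = ((List.range' 1 (mN-1)).map (pairA l dN)).map (·.1) := by
      rw [List.range'_eq_map_range, List.map_map, List.map_map]
      apply List.map_congr_left
      intro k _
      simp [Nat.add_comm]
    rw [hmaps, postFlush]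
  · -- pointwise step equivalence
    intro st k hk
    rw [List.mem_range] at hk
    beta_reduce
    have hj : 1 ≤ k + 1 := by omega
    have hjm : k + 1 ≤ mN - 1 := by omega
    have hjn : (k+1)*dN ≤ l.length := by
      calc (k+1)*dN ≤ (mN-1)*dN := Nat.mul_le_mul_right _ hjm
      _ ≤ l.length := le_of_lt hlb
    have hiff := chunkEqIff l dN (k+1) (by omega) hj hjn
    have hcast1 : (1 + (k:Int) + 1) * ↑dN = (((k+2)*dN : Nat) : Int) := by push_cast; ring
    have hcast2 : (1 + (k:Int)) * ↑dN = (((k+1)*dN : Nat) : Int) := by push_cast; ring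
    by_cases hfull : (k+1+1)*dN ≤ l.length
    · have hg1 : PySem.List.pyGetD ((List.range (l.length+1)).map (fun i => (mCount l dN i : Int)))
          ((1 + (k:Int) + 1) * ↑dN) 0 = (mCount l dN ((k+2)*dN) : Int) := by
        rw [hcast1]; exact prefGet l dN l.length _ (by omega)
      have hg2 : PySem.List.pyGetD ((List.range (l.length+1)).map (fun i => (mCount l dN i : Int)))
          ((1 + (k:Int)) * ↑dN) 0 = (mCount l dN ((k+1)*dN) : Int) := by
        rw [hcast2]; exact prefGet l dN l.length _ (by omega)
      have hcond : ((1 + (k:Int) + 1) * ↑dN ≤ (l.length:Int) ∧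
            PySem.List.pyGetD ((List.range (l.length+1)).map (fun i => (mCount l dN i : Int)))
              ((1 + (k:Int) + 1) * ↑dN) 0
            = PySem.List.pyGetD ((List.range (l.length+1)).map (fun i => (mCount l dN i : Int)))
              ((1 + (k:Int)) * ↑dN) 0)
          ↔ (chunkL l dN (k+1-1) = chunkL l dN (k+1)) := by
        rw [hg1, hg2, hiff]
        constructor
        · rintro ⟨-, h2⟩
          refine ⟨by omega, ?_⟩
          have : mCount l dN ((k+2)*dN) = mCount l dN ((k+1)*dN) := by exact_mod_cast h2
          simpa [show k+1+1 = k+2 by omega] using this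
        · rintro ⟨-, h2⟩
          refine ⟨by rw [hcast1]; exact_mod_cast (show ((k+2)*dN : Nat) ≤ l.length by omega), ?_⟩
          rw [show k+1+1 = k+2 by omega] at h2
          exact_mod_cast h2
      by_cases hc : chunkL l dN (k+1-1) = chunkL l dN (k+1)
      · rw [if_pos (hcond.mpr hc)]
        have hb : (pairA l dN (k+1)).1 = true := by
          simp only [pairA]; exact decide_eq_true hc
        rw [hb]
        simp [bStep]
      · rw [if_neg (fun hh => hc (hcond.mp hh))]
        have hb : (pairA l dN (k+1)).1 = false := by
          simp only [pairA]; exact decide_eq_false hc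
        rw [hb]
        simp only [bStep, Bool.false_eq_true, if_false]
        by_cases hgt : st.2 > 1
        · rw [if_pos hgt]
          unfold adjLen
          rw [if_pos hgt]
          rw [Prod.mk.injEq]
          exact ⟨by ring, rfl⟩
        · rw [if_neg hgt]
          unfold adjLen
          rw [if_neg hgt]
          simp
    · have hc : ¬ (chunkL l dN (k+1-1) = chunkL l dN (k+1)) := by
        intro hh
        exact hfull (hiff.mp hh).1
      have hcondF : ¬ ((1 + (k:Int) + 1) * ↑dN ≤ (l.length:Int) ∧
            PySem.List.pyGetD ((List.range (l.length+1)).map (fun i => (mCount l dN i : Int)))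
              ((1 + (k:Int) + 1) * ↑dN) 0
            = PySem.List.pyGetD ((List.range (l.length+1)).map (fun i => (mCount l dN i : Int)))
              ((1 + (k:Int)) * ↑dN) 0) := by
        rintro ⟨h1, -⟩
        rw [hcast1] at h1
        have h1' : (k+2)*dN ≤ l.length := by exact_mod_cast h1
        exact hfull (by omega)
      rw [if_neg hcondF]
      have hb : (pairA l dN (k+1)).1 = false := by
        simp only [pairA]; exact decide_eq_false hc
      rw [hb]
      simp only [bStep, Bool.false_eq_true, if_false]
      by_cases hgt : st.2 > 1
      · rw [if_pos hgt]
        unfold adjLen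
        rw [if_pos hgt]
        rw [Prod.mk.injEq]
        exact ⟨by ring, rfl⟩
      · rw [if_neg hgt]
        unfold adjLen
        rw [if_neg hgt]
        simp

lemma perSize (l : List Char) (dN : Nat) (hd : 1 ≤ dN) (hdn : 2*dN ≤ l.length) :
    innerLenA l ↑dN = compressedTotal l ↑l.length ↑dN := by
  have hd0 : (0:Int) < ↑dN := by exact_mod_cast hd
  have hnn : 2 ≤ l.length := by omega
  have hbr := (PySem.Int.neg_floordiv_neg_eq_iff_of_pos (a := (l.length:Int)) (b := ↑dN)
    (q := -(PySem.Int.floordiv (-(l.length:Int)) ↑dN)) hd0).mp rfl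
  have hmIpos : 1 ≤ -(PySem.Int.floordiv (-(l.length:Int)) ↑dN) := by
    by_contra h
    push Not at h
    have h0 : -(PySem.Int.floordiv (-(l.length:Int)) ↑dN) ≤ 0 := by omega
    nlinarith [hbr.2, hd0, (show (2:Int) ≤ ↑l.length by exact_mod_cast hnn)]
  have hmNI : (((-(PySem.Int.floordiv (-(l.length:Int)) ↑dN)).toNat : Int))
      = -(PySem.Int.floordiv (-(l.length:Int)) ↑dN) := Int.toNat_of_nonneg (by omega)
  set mN := (-(PySem.Int.floordiv (-(l.length:Int)) ↑dN)).toNat with hmNdef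
  have hub : l.length ≤ mN * dN := by
    have h2 := hbr.2
    rw [← hmNI] at h2
    exact_mod_cast h2
  have hlb : (mN - 1) * dN < l.length := by
    have h1 := hbr.1
    rw [← hmNI] at h1
    have hx : ((mN:Int) - 1) = ((mN - 1 : Nat) : Int) := by omega
    rw [hx] at h1
    exact_mod_cast h1
  have hm2 : 2 ≤ mN := by
    by_contra h
    push Not at h
    have h1 : mN * dN ≤ 1 * dN := Nat.mul_le_mul_right _ (by omega)
    omega
  have hmI : -(PySem.Int.floordiv (-(l.length:Int)) ↑dN) = (mN:Int) := hmNI.symm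
  rw [innerA_eq l dN hd hdn, compressedTotal_eq l dN mN hd hlb hm2 hmI]
  have hqd : (l.length / dN) * dN ≤ l.length := Nat.div_mul_le_self _ _
  have hqd2 : l.length < (l.length / dN + 1)*dN := by
    have h1 : dN * (l.length / dN) + l.length % dN = l.length := Nat.div_add_mod _ _
    have h2 : l.length % dN < dN := Nat.mod_lt _ (by omega)
    have hcm : dN * (l.length / dN) = (l.length / dN) * dN := Nat.mul_comm _ _
    have h3 : (l.length / dN + 1)*dN = (l.length / dN)*dN + dN := by ring
    omega
  -- scan_rel over the common boundary list
  have htrue : ∀ p ∈ (List.range' 1 (mN-1)).map (pairA l dN), p.1 = true → p.2 = (dN:Int) := by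
    intro p hp ht
    rw [List.mem_map] at hp
    obtain ⟨kk, hkk, rfl⟩ := hp
    have hkb := List.mem_range'_1.mp hkk
    simp only [pairA, decide_eq_true_eq] at ht ⊢
    have hkdn : kk * dN ≤ l.length := by
      calc kk * dN ≤ (mN-1)*dN := Nat.mul_le_mul_right _ (by omega)
      _ ≤ l.length := le_of_lt hlb
    have hlen1 : (chunkL l dN (kk-1)).length = dN := by
      rw [chunk_len]
      have he : (kk-1)*dN + dN = kk*dN := by
        have h1 : (kk-1)+1 = kk := by omega
        calc (kk-1)*dN + dN = ((kk-1)+1)*dN := by ring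
        _ = kk*dN := by rw [h1]
      omega
    have hlen2 : (chunkL l dN kk).length = dN :=
      (congrArg List.length ht).symm.trans hlen1
    exact_mod_cast congrArg Nat.cast hlen2
  have hsumN : ((List.range' 1 (mN-1)).map (fun k => (chunkL l dN k).length)).sum
      = l.length - dN := by
    have hr : List.range mN = 0 :: List.range' 1 (mN-1) := by
      rw [List.range_eq_range']
      have h1 : mN = (mN-1)+1 := by omega
      conv_lhs => rw [h1]
      rw [List.range'_succ]
    have hsumall : ((List.range mN).map (fun k => (chunkL l dN k).length)).sum = l.length := by
      rw [List.map_congr_left (fun k _ => chunk_len l dN k), sum_min_range]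
      omega
    rw [hr, List.map_cons, List.sum_cons, chunk_len] at hsumall
    have h0 : min dN (l.length - 0*dN) = dN := by omega
    omega
  have hsum : (((List.range' 1 (mN-1)).map (pairA l dN)).map (·.2)).sum
      = (l.length : Int) - ↑dN := by
    rw [List.map_map]
    have hcomp : ((·.2) ∘ pairA l dN) = (fun k => ((chunkL l dN k).length : Int)) := rfl
    rw [hcomp]
    have h1 : ((List.range' 1 (mN-1)).map (fun k => ((chunkL l dN k).length : Int))).sum
        = ((((List.range' 1 (mN-1)).map (fun k => (chunkL l dN k).length)).sum : Nat) : Int) := by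
      rw [Nat.cast_list_sum, List.map_map]
      rfl
    rw [h1, hsumN]
    omega
  have hscan := scan_rel dN ((List.range' 1 (mN-1)).map (pairA l dN)) 1 (↑dN) (↑l.length)
    le_rfl htrue (by rw [hsum]; ring)
  by_cases hdvd : dN ∣ l.length
  · -- exact division: the A loop sees one extra, empty chunk which flushes the last run
    have hqm : l.length / dN = mN := by
      obtain ⟨c, hc⟩ := hdvd
      have hq' : l.length / dN = c := by rw [hc, Nat.mul_div_cancel_left _ (by omega)]
      have hcd : dN * c = c * dN := Nat.mul_comm _ _
      have hlt : mN - 1 < c := by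
        have := hlb
        rw [hc, hcd] at this
        exact Nat.lt_of_mul_lt_mul_right this
      have hle : c ≤ mN := by
        have := hub
        rw [hc, hcd] at this
        exact Nat.le_of_mul_le_mul_right this (by omega)
      omega
    rw [hqm]
    have hsplit : List.range' 1 mN = List.range' 1 (mN-1) ++ [mN] := by
      have h1 : mN = (mN-1)+1 := by omega
      conv_lhs => rw [h1]
      rw [List.range'_1_concat, show 1+(mN-1) = mN from by omega]
    have hpairlast : pairA l dN mN = (false, 0) := by
      have hchm : chunkL l dN mN = [] := by
        unfold chunkL
        rw [List.drop_eq_nil_iff.mpr (by omega : l.length ≤ mN*dN)]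
        simp
      have hne : chunkL l dN (mN-1) ≠ [] := by
        intro h
        have hl := congrArg List.length h
        rw [chunk_len] at hl
        simp at hl
        omega
      unfold pairA
      rw [hchm]
      simp [hne]
    rw [hsplit, List.map_append, aAbs_append]
    simp only [List.map_cons, List.map_nil]
    rw [hpairlast]
    simpa [aAbs] using hscan.1
  · -- the A loop's last chunk is partial, so the final run has count 1 and no flush is needed
    have hlt : l.length < mN*dN := by
      rcases Nat.lt_or_ge l.length (mN*dN) with h | h
      · exact h
      · exact absurd ((le_antisymm hub h) ▸ dvd_mul_left dN mN) hdvd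
    have hqm : l.length / dN = mN - 1 := by
      have hlt2 : (mN-1) < l.length / dN + 1 := by
        have e2 : (mN-1)*dN < (l.length / dN + 1)*dN := lt_of_lt_of_le hlb (le_of_lt hqd2)
        exact Nat.lt_of_mul_lt_mul_right e2
      have hle2 : l.length / dN ≤ mN - 1 := by
        by_contra hcon
        push Not at hcon
        have : mN ≤ l.length / dN := by omega
        have := Nat.mul_le_mul_right dN this
        omega
      omega
    rw [hqm]
    have hsplit : List.range' 1 (mN-1) = List.range' 1 (mN-2) ++ [mN-1] := by
      have h1 : mN-1 = (mN-2)+1 := by omega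
      conv_lhs => rw [h1]
      rw [List.range'_1_concat, show 1+(mN-2) = mN-1 from by omega]
    have hlastb : (pairA l dN (mN-1)).1 = false := by
      simp only [pairA]
      apply decide_eq_false
      intro hh
      have hl := congrArg List.length hh
      rw [chunk_len, chunk_len] at hl
      have e1 : (mN-1-1)*dN + dN = (mN-1)*dN := by
        have h1 : (mN-1-1)+1 = mN-1 := by omega
        calc (mN-1-1)*dN + dN = ((mN-1-1)+1)*dN := by ring
        _ = (mN-1)*dN := by rw [h1]
      have e2 : (mN-1)*dN + dN = mN*dN := by
        have h1 : (mN-1)+1 = mN := by omega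
        calc (mN-1)*dN + dN = ((mN-1)+1)*dN := by ring
        _ = mN*dN := by rw [h1]
      omega
    have hc1 : (aAbs ((List.range' 1 (mN-1)).map (pairA l dN)) (1,(dN:Int))).1 = 1 := by
      rw [hsplit, List.map_append, aAbs_append]
      simp [aAbs, hlastb]
    have hfin := hscan.1
    rw [hc1] at hfin
    simpa [padLen] using hfin

lemma foldA_eq_min (l : List Char) (hn2 : 2 ≤ l.length) :
    (PySem.List.pyRange 1 (((l.length/2 : Nat) : Int) + 1) 1).foldl
      (fun minSize size => if size = 1 then innerLenA l size
        else if minSize > innerLenA l size then innerLenA l size else minSize) 0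
    = ((PySem.List.min? ((PySem.List.pyRange 1 (((l.length/2 : Nat):Int) + 1) 1).map
        (fun size => compressedTotal l ↑l.length size)) (fun x => x)).getD 0) := by
  have hhalf : 1 ≤ l.length/2 := by omega
  have hlt : (1:Int) < ((l.length/2 : Nat):Int) + 1 := by
    have : (1:Int) ≤ ((l.length/2 : Nat):Int) := by exact_mod_cast hhalf
    omega
  rw [PySem.List.pyRange_one_cons hlt]
  simp only [List.foldl_cons, List.map_cons, if_pos]
  have h1size : innerLenA l 1 = compressedTotal l ↑l.length 1 := by
    have := perSize l 1 le_rfl (by omega)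
    simpa using this
  rw [h1size]
  have hpoint : ∀ (acc : Int), ∀ sz ∈ PySem.List.pyRange (1+1) (((l.length/2 : Nat):Int) + 1) 1,
      (if sz = 1 then innerLenA l sz
        else if acc > innerLenA l sz then innerLenA l sz else acc)
      = min acc (compressedTotal l ↑l.length sz) := by
    intro acc sz hsz
    have hmem := PySem.List.mem_pyRange_one.mp hsz
    have hszn : sz = ((sz.toNat : Nat) : Int) := by omega
    have h2d : 1 ≤ sz.toNat := by omega
    have hup : 2 * sz.toNat ≤ l.length := by
      have hle : (sz:Int) ≤ ((l.length/2 : Nat):Int) := by omega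
      have : sz.toNat ≤ l.length/2 := by omega
      omega
    have ht : innerLenA l sz = compressedTotal l ↑l.length sz := by
      rw [hszn]
      exact perSize l sz.toNat h2d hup
    rw [if_neg (by omega : ¬ sz = 1), ht]
    omega
  rw [PySem.List.foldl_congr_mem _ _
    (fun acc sz => min acc (compressedTotal l ↑l.length sz)) _ hpoint]
  rw [← List.foldl_map (f := fun size => compressedTotal l ↑l.length size) (g := min)]
  rw [PySem.List.min?_id_cons]
  rfl


-- ===== VERDICT (by name: the statement is the Claim_ definition above) =====
theorem solution_spec : Claim_equal_solution := by
  intro s hdom hpre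
  unfold Spec_solution
  have hne : s.toList ≠ [] := fun h => hpre (String.toList_eq_nil_iff.mp h)
  have hn1 : 1 ≤ s.toList.length := by
    have := List.length_pos_iff.mpr hne
    omega
  simp only [solution, solution_alt, PySem.Chars.len_eq]
  by_cases h1 : s.toList.length = 1
  · rw [h1]
    norm_num
  · have hne1 : ¬ ((s.toList.length : Int) = 1) := by exact_mod_cast h1
    rw [if_neg hne1, if_neg hne1]
    have hn2 : 2 ≤ s.toList.length := by omega
    have hfd : PySem.Int.floordiv (↑s.toList.length) 2 = ((s.toList.length/2 : Nat) : Int) := by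
      exact_mod_cast PySem.Int.floordiv_natCast s.toList.length 2
    rw [hfd]
    exact foldA_eq_min s.toList hn2
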